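-- pv_equiv track=rewrite | github.com/ItoHiroakiAsahi/FCS_Copy_and_Check_Value | check_info_sheets.py | _min_val_info_from_dict
-- ===== SOURCE A (Python) =====
-- from typing import Union, Dict, List, Tuple
--
-- def _min_val_info_from_dict(d: Dict[str, Dict[str, List[int]]]) -> Tuple[int, int]:
--     """概要
--     2つの林地情報の差分情報を格納した辞書型を受け取り、差分が最も少ない組み合わせのindexを返す。
--
--     Parameters
--     ----------
--     d: Dict[str, Dict[str, List[int]]]
--         すべての林地情報同士の組み合わせにおいて、差分が認められる位置を格納したリスト型を
--         valueに持つdict型。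
--
--     Returns
--     ----------
--     t_df_index: int
--         差分が最も少ない組み合わせのうち、差分を赤字にするworksheetに紐づく林地情報の位置。
--
--     r_df_index: int
--         差分が最も少ない組み合わせのうち、参照されるworksheetに紐づく林地情報の位置。
--     """
--     min_d = {key: min(d[key].values()) for key in d.keys()}
--     min_s = min(min_d.values())
--     t_df_index = -1
--     for key in min_d.keys():
--         if min_d[key] == min_s:
--             t_df_index = key
--             break
--     if t_df_index == -1:
--         raise ValueError('条件に合うt_df_indexが存在しません。\n' \
--         'd: {}, min_s: {}, t_df_index: {}, r_df_index: {}'.format(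
--             d, min_s, t_df_index, r_df_index))
--     r_df_index = -1
--     for key in d[t_df_index].keys():
--         if d[t_df_index][key] == min_s:
--             r_df_index = key
--             break
--     if r_df_index == -1:
--         raise ValueError('条件に合うt_df_indexが存在しません。\n' \
--         'd: {}, min_s: {}, t_df_index: {}, r_df_index: {}'.format(
--             d, min_s, t_df_index, r_df_index))
--     return t_df_index, r_df_index
-- ===== SOURCE B (Python) =====
-- from typing import Dict, List, Tuple
--
-- def _min_val_info_from_dict(d: Dict[str, Dict[str, List[int]]]) -> Tuple[int, int]:
--     """Single pass: keep the running minimum and its (outer, inner) keys."""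
--     best = None
--     t_idx = None
--     r_idx = None
--     for tk, inner in d.items():
--         cur = min(inner.values())
--         if best is None or cur < best:
--             best = cur
--             t_idx = tk
--             r_idx = next(k for k, v in inner.items() if v == cur)
--     if t_idx is None:
--         raise ValueError('条件に合うt_df_indexが存在しません。')
--     return t_idx, r_idx
-- ===== Notes on version B (the rewrite author's own statement) =====
-- stated objective: simpler
-- what changed: A builds a dict of per-key minima, takes the global minimum, then runs two separate find loops; B is a single pass over the dict that keeps the running minimum together with its outer and inner key.
import Mathlib
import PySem

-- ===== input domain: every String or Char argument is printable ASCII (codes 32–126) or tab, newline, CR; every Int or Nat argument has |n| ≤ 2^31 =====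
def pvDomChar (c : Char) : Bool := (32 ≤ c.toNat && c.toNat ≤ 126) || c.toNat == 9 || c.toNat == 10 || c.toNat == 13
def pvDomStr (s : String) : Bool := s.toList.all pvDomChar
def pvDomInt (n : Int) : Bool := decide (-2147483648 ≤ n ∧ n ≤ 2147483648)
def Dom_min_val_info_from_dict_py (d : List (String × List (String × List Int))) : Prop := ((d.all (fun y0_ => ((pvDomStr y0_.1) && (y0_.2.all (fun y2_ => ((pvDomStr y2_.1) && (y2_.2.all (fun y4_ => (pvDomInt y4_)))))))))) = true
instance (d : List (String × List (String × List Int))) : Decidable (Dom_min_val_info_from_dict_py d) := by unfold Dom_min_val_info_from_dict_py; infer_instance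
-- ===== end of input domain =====

-- B replaces A's four passes (build min_d, global min, find t, find r) by one pass that keeps
-- the running minimum with its outer and inner key (objective: simpler/alternative single traversal).

-- ===== PORT A =====
-- min_d = {key: min(d[key].values()) for key in d.keys()}; 'none' = some min() raised ValueError (empty inner dict)
def aMinD (d : List (String × List (String × List Int))) :
    List String → PySem.Dict String (List Int) → Option (PySem.Dict String (List Int))
  | [], acc => some acc
  | key :: rest, acc =>
    match PySem.List.min? (((PySem.Dict.mk d).getD key []).map (·.2)) (fun v => v) with
    | none => none
    | some m => aMinD d rest (acc.insert key m)

-- A's two find loops have the same shape: for key in dct: if dct[key] == min_s: … break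
-- (lookup per key, as A writes it; getD's default is never used: every key comes from the dict itself)
def aFindKey (dct : PySem.Dict String (List Int)) (keys : List String) (min_s : List Int) : Option String :=
  match keys with
  | [] => none
  | k :: rest => if dct.getD k [] = min_s then some k else aFindKey dct rest min_s

def min_val_info_from_dict_py (d : List (String × List (String × List Int))) : String × String :=
  match aMinD d (PySem.Dict.mk d).keys PySem.Dict.empty with
  | none => ("", "")       -- Python: ValueError from min() on an empty inner dict
  | some min_d =>
    match PySem.List.min? min_d.values (fun v => v) with
    | none => ("", "")     -- Python: ValueError from min() on an empty dict
    | some min_s =>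
      match aFindKey min_d min_d.keys min_s with
      | none => ("", "")   -- Python: raise ValueError (t_df_index == -1; unreachable when min() succeeded)
      | some t =>
        let inner := (PySem.Dict.mk d).getD t []
        match aFindKey (PySem.Dict.mk inner) (inner.map (·.1)) min_s with
        | none => ("", "") -- Python: raise ValueError (r_df_index == -1; unreachable)
        | some r => (t, r)

-- ===== PORT B =====
-- next(k for k, v in inner.items() if v == cur)  (the generator finds the first matching pair; it never
-- fails because cur is one of the values, so the total form's default "" is never used)
def bFindR (inner : List (String × List Int)) (target : List Int) : Option String :=
  match inner with
  | [] => none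
  | (k, v) :: rest => if v = target then some k else bFindR rest target

-- the one-pass loop; state = best value with its two keys; 'none' result = Python raised ValueError
def bLoop : List (String × List (String × List Int)) → Option (List Int × String × String) →
    Option (List Int × String × String)
  | [], best => best
  | (tk, inner) :: rest, best =>
    match PySem.List.min? (inner.map (·.2)) (fun v => v) with
    | none => none           -- Python: ValueError from min() on an empty inner dict
    | some cur =>
      match best with
      | none => bLoop rest (some (cur, tk, (bFindR inner cur).getD ""))
      | some b =>
        if cur < b.1 then bLoop rest (some (cur, tk, (bFindR inner cur).getD ""))
        else bLoop rest (some b)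

def min_val_info_from_dict_py_alt (d : List (String × List (String × List Int))) : String × String :=
  match bLoop d none with
  | some (_, t, r) => (t, r)
  | none => ("", "")         -- Python: raise ValueError (empty dict)

-- ===== PRECONDITION & SPEC =====
-- Pre_ excludes the empty dict and dicts with an empty inner dict (A's min() raises ValueError there), and
-- association lists with duplicate keys at either level, which cannot arise from a Python dict.
def Pre_min_val_info_from_dict_py (d : List (String × List (String × List Int))) : Prop :=
  d ≠ [] ∧ (∀ p ∈ d, p.2 ≠ []) ∧ (d.map (·.1)).Nodup ∧ ∀ p ∈ d, (p.2.map (·.1)).Nodup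
instance (d : List (String × List (String × List Int))) : Decidable (Pre_min_val_info_from_dict_py d) := by
  unfold Pre_min_val_info_from_dict_py; infer_instance

def pvWitness_min_val_info_from_dict_py : (List (String × List (String × List Int))) :=
  [("a", [("x", [1, 2])]), ("b", [("y", [0]), ("z", [3])])]

def Spec_min_val_info_from_dict_py (d : List (String × List (String × List Int))) (out : String × String) : Prop := out = min_val_info_from_dict_py_alt d
instance (d : List (String × List (String × List Int))) (out : String × String) : Decidable (Spec_min_val_info_from_dict_py d out) := by unfold Spec_min_val_info_from_dict_py; infer_instance

-- ===== CLAIM (what is proved, stated in full; the proofs are below) =====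
def Claim_equal_min_val_info_from_dict_py : Prop := ∀ (d : List (String × List (String × List Int))), Dom_min_val_info_from_dict_py d → Pre_min_val_info_from_dict_py d → Spec_min_val_info_from_dict_py d (min_val_info_from_dict_py d)

-- ===== LEMMAS AND PROOFS =====

-- the minimum value of one inner dict (total form; under Pre_ the inner list is nonempty so min? is some)
def mval (inner : List (String × List Int)) : List Int :=
  (PySem.List.min? (inner.map (·.2)) (fun v => v)).getD []

-- B's loop after the first element, with a definite accumulator
def bStep (acc : List Int × String × String) (p : String × List (String × List Int)) :
    List Int × String × String :=
  if mval p.2 < acc.1 then (mval p.2, p.1, (bFindR p.2 (mval p.2)).getD "") else acc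

def mkTriple (p : String × List (String × List Int)) : List Int × String × String :=
  (mval p.2, p.1, (bFindR p.2 (mval p.2)).getD "")

theorem min?_eq_mval {inner : List (String × List Int)} (h : inner ≠ []) :
    PySem.List.min? (inner.map (·.2)) (fun v => v) = some (mval inner) := by
  unfold mval
  cases hm : PySem.List.min? (inner.map (·.2)) (fun v => v) with
  | none => exact absurd (List.map_eq_nil_iff.1 ((PySem.List.min?_eq_none_iff _ _).1 hm)) h
  | some m => rfl

theorem bLoop_eq_foldl (rest : List (String × List (String × List Int)))
    (b : List Int × String × String) (h : ∀ p ∈ rest, p.2 ≠ []) :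
    bLoop rest (some b) = some (rest.foldl bStep b) := by
  induction rest generalizing b with
  | nil => rfl
  | cons p t ih =>
    have hne : p.2 ≠ [] := h p (List.mem_cons_self)
    have ht : ∀ q ∈ t, q.2 ≠ [] := fun q hq => h q (List.mem_cons_of_mem _ hq)
    obtain ⟨tk, inner⟩ := p
    rw [List.foldl_cons]
    show bLoop ((tk, inner) :: t) (some b) = _
    rw [bLoop, min?_eq_mval hne]
    by_cases hc : mval inner < b.1
    · simp only [hc, if_pos, bStep, ih _ ht]
    · simp only [bStep, hc, ite_false, ih _ ht]

theorem foldl_min_le_init (b : List Int) (ms : List (List Int)) : ms.foldl min b ≤ b := by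
  induction ms generalizing b with
  | nil => simp
  | cons x t ih => exact le_trans (ih (min b x)) (min_le_left b x)

theorem foldl_min_mem (b : List Int) (ms : List (List Int)) :
    ms.foldl min b = b ∨ ms.foldl min b ∈ ms := by
  induction ms generalizing b with
  | nil => simp
  | cons x t ih =>
    rw [List.foldl_cons]
    rcases ih (min b x) with h | h
    · rcases min_cases b x with ⟨he, _⟩ | ⟨he, _⟩
      · left; rw [h, he]
      · right; rw [h, he]; exact List.mem_cons_self
    · right; exact List.mem_cons_of_mem _ h

-- first entry of the list attaining the value M (A's t-search and B's winner coincide on it)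
def firstMin (rest : List (String × List (String × List Int))) (M : List Int) :
    Option (String × List (String × List Int)) :=
  rest.find? (fun p => decide (mval p.2 = M))

theorem firstMin_cons (p : String × List (String × List Int))
    (t : List (String × List (String × List Int))) (M : List Int) :
    firstMin (p :: t) M = if mval p.2 = M then some p else firstMin t M := by
  by_cases h : mval p.2 = M <;> simp [firstMin, h]

theorem firstMin_isSome (rest : List (String × List (String × List Int))) (M : List Int)
    (h : M ∈ rest.map (fun p => mval p.2)) : (firstMin rest M).isSome := by
  rw [firstMin, List.find?_isSome]
  obtain ⟨q, hq, hq2⟩ := List.mem_map.1 h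
  exact ⟨q, hq, by simp [hq2]⟩

theorem firstMin_eq (rest : List (String × List (String × List Int))) (M : List Int)
    {q : String × List (String × List Int)} (h : firstMin rest M = some q) :
    q ∈ rest ∧ mval q.2 = M := by
  rw [firstMin] at h
  exact ⟨List.mem_of_find?_eq_some h, by simpa using List.find?_some h⟩

-- the crux: the running-min fold equals "global min, then first entry attaining it"
theorem foldl_bStep_spec (rest : List (String × List (String × List Int)))
    (b : List Int × String × String) :
    rest.foldl bStep b =
      (if (rest.map (fun p => mval p.2)).foldl min b.1 < b.1 then
        ((firstMin rest ((rest.map (fun q => mval q.2)).foldl min b.1)).elim b mkTriple)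
      else b) := by
  induction rest generalizing b with
  | nil => simp
  | cons p t ih =>
    rw [List.foldl_cons, List.map_cons, List.foldl_cons, firstMin_cons]
    by_cases hc : mval p.2 < b.1
    · have hb : bStep b p = mkTriple p := by simp [bStep, mkTriple, hc]
      have hmin : min b.1 (mval p.2) = mval p.2 := min_eq_right (le_of_lt hc)
      rw [hb, hmin, ih (mkTriple p)]
      have hM' : (t.map (fun q => mval q.2)).foldl min (mval p.2) ≤ mval p.2 :=
        foldl_min_le_init _ _
      by_cases h2 : (t.map (fun q => mval q.2)).foldl min (mval p.2) < mval p.2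
      · have hlt : (t.map (fun q => mval q.2)).foldl min (mval p.2) < b.1 := lt_trans h2 hc
        have hne : ¬ (mval p.2 = (t.map (fun q => mval q.2)).foldl min (mval p.2)) :=
          fun h => absurd h2 (by rw [← h]; exact lt_irrefl _)
        have hmem : (t.map (fun q => mval q.2)).foldl min (mval p.2) ∈ t.map (fun q => mval q.2) := by
          rcases foldl_min_mem (mval p.2) (t.map (fun q => mval q.2)) with h | h
          · exact absurd h (fun he => hne he.symm)
          · exact h
        obtain ⟨q', hq'⟩ := Option.isSome_iff_exists.1 (firstMin_isSome t _ hmem)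
        simp only [mkTriple] at *
        simp [h2, hlt, hne, hq']
      · have heq : (t.map (fun q => mval q.2)).foldl min (mval p.2) = mval p.2 :=
          le_antisymm hM' (not_lt.1 h2)
        simp [heq, hc, mkTriple]
    · have hb : bStep b p = b := by simp [bStep, hc]
      have hmin : min b.1 (mval p.2) = b.1 := min_eq_left (not_lt.1 hc)
      rw [hb, hmin, ih b]
      by_cases h2 : (t.map (fun q => mval q.2)).foldl min b.1 < b.1
      · have hne : ¬ (mval p.2 = (t.map (fun q => mval q.2)).foldl min b.1) := by
          intro h
          exact absurd (lt_of_lt_of_le h2 (not_lt.1 hc)) (by rw [← h]; exact lt_irrefl _)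
        simp [h2, hne]
      · simp [h2]

theorem lookup_mk {β : Type} (d : List (String × β)) (dflt : β) (hnd : (d.map (·.1)).Nodup)
    {p : String × β} (hp : p ∈ d) : (PySem.Dict.mk d).getD p.1 dflt = p.2 := by
  have h1 : (PySem.Dict.mk d).get? p.1 = some p.2 := by
    apply PySem.Dict.get?_of_mem_items
    · exact hp
    · simpa [PySem.Dict.keys_mk] using hnd
  exact PySem.Dict.getD_of_get?_eq_some _ dflt h1

theorem aFindKey_skip (k : String) (v : List Int) (rest : List (String × List Int))
    (ks : List String) (hk : k ∉ ks) (t : List Int) :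
    aFindKey (PySem.Dict.mk ((k, v) :: rest)) ks t = aFindKey (PySem.Dict.mk rest) ks t := by
  induction ks with
  | nil => rfl
  | cons k' ks' ih =>
    have hne : k ≠ k' := fun h => hk (h ▸ List.mem_cons_self)
    rw [aFindKey, aFindKey]
    have : (PySem.Dict.mk ((k, v) :: rest)).getD k' [] = (PySem.Dict.mk rest).getD k' [] := by
      simp [PySem.Dict.getD_eq_get?_getD, PySem.Dict.get?_mk_cons, beq_iff_eq, hne]
    rw [this, ih (fun h => hk (List.mem_cons_of_mem _ h))]

theorem aFindKey_eq_bFindR (inner : List (String × List Int)) (hnd : (inner.map (·.1)).Nodup)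
    (t : List Int) : aFindKey (PySem.Dict.mk inner) (inner.map (·.1)) t = bFindR inner t := by
  induction inner with
  | nil => rfl
  | cons p rest ih =>
    obtain ⟨k, v⟩ := p
    rw [List.map_cons, aFindKey, bFindR]
    have hhd : (PySem.Dict.mk ((k, v) :: rest)).getD k [] = v := by
      simp [PySem.Dict.getD_eq_get?_getD, PySem.Dict.get?_mk_cons]
    rw [hhd]
    rcases List.nodup_cons.1 hnd with ⟨hk, hnd'⟩
    by_cases hv : v = t
    · simp [hv]
    · simp only [hv, ite_false]
      rw [aFindKey_skip k v rest _ hk t, ih hnd']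

theorem aMinD_spec (d : List (String × List (String × List Int)))
    (ks : List String) (acc : PySem.Dict String (List Int))
    (hne : ∀ k ∈ ks, ((PySem.Dict.mk d).getD k []) ≠ [])
    (hnd : ks.Nodup) (hfresh : ∀ k ∈ ks, acc.contains k = false) :
    aMinD d ks acc = some ⟨acc.items ++ ks.map (fun k => (k, mval ((PySem.Dict.mk d).getD k [])))⟩ := by
  induction ks generalizing acc with
  | nil => simp [aMinD]
  | cons k ks ih =>
    have hk : ((PySem.Dict.mk d).getD k []) ≠ [] := hne k List.mem_cons_self
    rw [aMinD, min?_eq_mval hk]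
    dsimp only
    rcases List.nodup_cons.1 hnd with ⟨hknot, hnd'⟩
    have hfk : acc.contains k = false := hfresh k List.mem_cons_self
    rw [ih _ (fun k' h => hne k' (List.mem_cons_of_mem _ h)) hnd'
        (fun k' h => by
          rw [PySem.Dict.contains_insert]
          have : k' ≠ k := fun he => hknot (he ▸ h)
          simp [this, hfresh k' (List.mem_cons_of_mem _ h)])]
    congr 1
    apply PySem.Dict.ext
    rw [PySem.Dict.items_insert_of_not_contains _ _ hfk]
    simp

theorem bFindR_map_firstMin (rest : List (String × List (String × List Int))) (M : List Int) :
    bFindR (rest.map (fun p => (p.1, mval p.2))) M = (firstMin rest M).map (·.1) := by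
  induction rest with
  | nil => rfl
  | cons p t ih =>
    rw [List.map_cons, bFindR, firstMin_cons]
    by_cases hv : mval p.2 = M
    · simp [hv]
    · simp [hv, ih]

theorem mval_mem {inner : List (String × List Int)} (h : inner ≠ []) :
    mval inner ∈ inner.map (·.2) :=
  PySem.List.min?_mem (min?_eq_mval h)

theorem bFindR_isSome (inner : List (String × List Int)) (t : List Int)
    (h : t ∈ inner.map (·.2)) : (bFindR inner t).isSome := by
  induction inner with
  | nil => simp at h
  | cons p restI ih =>
    obtain ⟨k, v⟩ := p
    rw [bFindR]
    by_cases hv : v = t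
    · simp [hv]
    · simp only [hv, ite_false]
      rcases List.mem_cons.1 h with h' | h'
      · exact absurd h'.symm hv
      · exact ih h'

theorem min?_id_cons' (x : List Int) (xs : List (List Int)) :
    PySem.List.min? (x :: xs) (fun v => v) = some (xs.foldl min x) := by
  have h := @PySem.List.min?_id_cons (List Int) _ x xs
  convert h using 2

theorem main_equiv (p0 : String × List (String × List Int))
    (rest : List (String × List (String × List Int)))
    (hinner : ∀ p ∈ p0 :: rest, p.2 ≠ [])
    (hnd : ((p0 :: rest).map (·.1)).Nodup)
    (hinnernd : ∀ p ∈ p0 :: rest, (p.2.map (·.1)).Nodup) :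
    min_val_info_from_dict_py (p0 :: rest) = min_val_info_from_dict_py_alt (p0 :: rest) := by
  have hlk : ∀ p ∈ p0 :: rest, (PySem.Dict.mk (p0 :: rest)).getD p.1 [] = p.2 :=
    fun p hp => lookup_mk _ [] hnd hp
  have hA1 : aMinD (p0 :: rest) (PySem.Dict.mk (p0 :: rest)).keys PySem.Dict.empty
      = some ⟨((p0 :: rest).map (·.1)).map
          (fun k => (k, mval ((PySem.Dict.mk (p0 :: rest)).getD k [])))⟩ := by
    rw [PySem.Dict.keys_mk]
    have h := aMinD_spec (p0 :: rest) ((p0 :: rest).map (·.1)) PySem.Dict.empty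
      (fun k hk => by
        obtain ⟨p, hp, rfl⟩ := List.mem_map.1 hk
        rw [hlk p hp]; exact hinner p hp)
      hnd
      (fun k _ => PySem.Dict.contains_empty k)
    simpa using h
  have hitems : ((p0 :: rest).map (·.1)).map
      (fun k => (k, mval ((PySem.Dict.mk (p0 :: rest)).getD k [])))
      = (p0.1, mval p0.2) :: rest.map (fun p => (p.1, mval p.2)) := by
    rw [List.map_map]
    have h : ((p0 :: rest).map (fun p => (p.1, mval ((PySem.Dict.mk (p0 :: rest)).getD p.1 []))))
        = (p0 :: rest).map (fun p => (p.1, mval p.2)) :=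
      List.map_congr_left (fun p hp => by rw [hlk p hp])
    simpa using h
  have hmin? : PySem.List.min? ((mval p0.2) :: rest.map (fun p => mval p.2)) (fun v => v)
      = some ((rest.map (fun p => mval p.2)).foldl min (mval p0.2)) := min?_id_cons' _ _
  have hB0 : min_val_info_from_dict_py_alt (p0 :: rest)
      = match bLoop rest (some (mkTriple p0)) with
        | some (_, t, r) => (t, r)
        | none => ("", "") := by
    rw [min_val_info_from_dict_py_alt, bLoop, min?_eq_mval (hinner p0 List.mem_cons_self)]
    dsimp only [mkTriple]
  rw [hB0, bLoop_eq_foldl rest (mkTriple p0) (fun q hq => hinner q (List.mem_cons_of_mem _ hq)),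
      foldl_bStep_spec rest (mkTriple p0)]
  rw [min_val_info_from_dict_py, hA1]
  simp only [hitems]
  rw [show (PySem.Dict.mk ((p0.1, mval p0.2) :: rest.map (fun p => (p.1, mval p.2)))).values
      = (mval p0.2) :: rest.map (fun p => mval p.2) by
    simp [PySem.Dict.values_mk, List.map_map]]
  rw [hmin?]
  dsimp only
  simp only [PySem.Dict.keys_mk]
  have hmsnd : (((p0.1, mval p0.2) :: rest.map (fun p => (p.1, mval p.2))).map (·.1)).Nodup := by
    simpa [List.map_map, Function.comp] using hnd
  rw [aFindKey_eq_bFindR _ hmsnd]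
  rw [bFindR]
  by_cases hc : (rest.map (fun p => mval p.2)).foldl min (mval p0.2) < mval p0.2
  · -- the minimum is attained strictly inside rest
    have hne : ¬ (mval p0.2 = (rest.map (fun p => mval p.2)).foldl min (mval p0.2)) :=
      fun h => absurd hc (by rw [← h]; exact lt_irrefl _)
    have hmem : (rest.map (fun p => mval p.2)).foldl min (mval p0.2)
        ∈ rest.map (fun p => mval p.2) := by
      rcases foldl_min_mem (mval p0.2) (rest.map (fun p => mval p.2)) with h | h
      · exact absurd h (fun he => hne he.symm)
      · exact h
    obtain ⟨q', hq'⟩ := Option.isSome_iff_exists.1 (firstMin_isSome rest _ hmem)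
    obtain ⟨hq'mem, hq'eq⟩ := firstMin_eq rest _ hq'
    obtain ⟨r, hr⟩ := Option.isSome_iff_exists.1
      (bFindR_isSome q'.2 (mval q'.2) (mval_mem (hinner q' (List.mem_cons_of_mem _ hq'mem))))
    simp only [hne, ite_false, bFindR_map_firstMin, hq', Option.map_some]
    rw [hlk q' (List.mem_cons_of_mem _ hq'mem)]
    rw [aFindKey_eq_bFindR q'.2 (hinnernd q' (List.mem_cons_of_mem _ hq'mem)) _]
    simp only [mkTriple] at ⊢
    rw [← hq'eq, hr]
    have hc2 : mval q'.2 < mval p0.2 := by rw [hq'eq]; exact hc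
    have hq2' : firstMin rest (mval q'.2) = some q' := by rw [hq'eq]; exact hq'
    simp [hc2, hq2', mkTriple, hr]
  · -- the head p0 already attains the minimum
    have heq : (rest.map (fun p => mval p.2)).foldl min (mval p0.2) = mval p0.2 :=
      le_antisymm (foldl_min_le_init _ _) (not_lt.1 hc)
    obtain ⟨r, hr⟩ := Option.isSome_iff_exists.1
      (bFindR_isSome p0.2 (mval p0.2) (mval_mem (hinner p0 List.mem_cons_self)))
    simp only [heq, ite_true]
    rw [hlk p0 List.mem_cons_self]
    rw [aFindKey_eq_bFindR p0.2 (hinnernd p0 List.mem_cons_self) _]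
    rw [hr]
    have hcond : ¬ ((rest.map (fun p => mval p.2)).foldl min (mkTriple p0).1 < (mkTriple p0).1) := hc
    simp only [mkTriple] at hcond ⊢
    simp [heq, hr]

-- ===== VERDICT (by name: the statement is the Claim_ definition above) =====
theorem min_val_info_from_dict_py_spec : Claim_equal_min_val_info_from_dict_py := by
  intro d _ hpre
  obtain ⟨hne0, hinner, hnd, hinnernd⟩ := hpre
  unfold Spec_min_val_info_from_dict_py
  cases d with
  | nil => exact absurd rfl hne0
  | cons p0 rest => exact main_equiv p0 rest hinner hnd hinnernd
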